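-- pv_equiv track=rewrite | github.com/caiwjohn/grantwriter-gpt | scripts/02_ingest_reviewed_aims.py | squash_single_newlines
-- ===== SOURCE A (Python) =====
-- def squash_single_newlines(lines: list[str]) -> str:
--     """Join lines into paragraphs: single newlines -> space, blank lines kept."""
--     paragraphs, buf = [], []
--     for line in lines + [""]:  # sentinel blank to flush
--         if line.strip() == "":
--             if buf:
--                 paragraphs.append(" ".join(buf).strip())
--                 buf = []
--             else:
--                 paragraphs.append("")  # preserve existing blank line
--         else:
--             buf.append(line.strip())
--     # remove leading/trailing blank paragraphs
--     while paragraphs and paragraphs[0] == "":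
--         paragraphs.pop(0)
--     while paragraphs and paragraphs[-1] == "":
--         paragraphs.pop()
--     return "\n\n".join(paragraphs)
-- ===== SOURCE B (Python) =====
-- def squash_single_newlines(lines: list[str]) -> str:
--     """Join lines into paragraphs: single newlines -> space, blank lines kept."""
--     paragraphs = []
--     n = len(lines)
--     i = 0
--     prev_content = False
--     while i < n:
--         j = i
--         if lines[i].strip() == "":
--             while j < n and lines[j].strip() == "":
--                 j += 1
--             k = j - i
--             paragraphs.extend([""] * (k - 1 if prev_content else k))
--             prev_content = False
--         else:
--             while j < n and lines[j].strip() != "":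
--                 j += 1
--             paragraphs.append(" ".join(l.strip() for l in lines[i:j]).strip())
--             prev_content = True
--         i = j
--     lo = 0
--     while lo < len(paragraphs) and paragraphs[lo] == "":
--         lo += 1
--     hi = len(paragraphs)
--     while hi > lo and paragraphs[hi - 1] == "":
--         hi -= 1
--     return "\n\n".join(paragraphs[lo:hi])
-- ===== Notes on version B (the rewrite author's own statement) =====
-- stated objective: alternative
-- what changed: Replaces the per-line buffer state machine with a run-based scan: each maximal run of content lines becomes one joined paragraph at once, each maximal blank run maps to k-1 (after content) or k empty paragraphs, with no sentinel line and index-based trimming.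
import Mathlib
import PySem

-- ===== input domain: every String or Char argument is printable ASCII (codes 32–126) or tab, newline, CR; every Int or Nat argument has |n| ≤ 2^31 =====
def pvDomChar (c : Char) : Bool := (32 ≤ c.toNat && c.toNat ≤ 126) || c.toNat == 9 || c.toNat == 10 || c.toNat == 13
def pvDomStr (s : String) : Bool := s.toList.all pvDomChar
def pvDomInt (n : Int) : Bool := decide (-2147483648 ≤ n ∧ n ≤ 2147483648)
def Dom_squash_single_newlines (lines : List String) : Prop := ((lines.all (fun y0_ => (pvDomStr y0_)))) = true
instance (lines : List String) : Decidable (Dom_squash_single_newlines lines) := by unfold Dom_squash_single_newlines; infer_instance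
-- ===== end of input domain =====

-- B replaces A's per-line buffer state machine by a run-based scan (whole content/blank runs at a time, no sentinel line); objective: alternative decomposition, same cost.

-- ===== PORT A =====
-- one loop iteration of A: state = (paragraphs, buf)
def pvAStep (st : List String × List String) (line : String) : List String × List String :=
  if PySem.Str.strip line = "" then
    if st.2 ≠ [] then (st.1 ++ [PySem.Str.strip (PySem.Str.join " " st.2)], [])
    else (st.1 ++ [""], st.2)
  else (st.1, st.2 ++ [PySem.Str.strip line])

-- 'while paragraphs and paragraphs[0] == "": paragraphs.pop(0)'
def pvATrimFront : List String → List String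
  | [] => []
  | x :: xs => if x = "" then pvATrimFront xs else x :: xs

-- 'while paragraphs and paragraphs[-1] == "": paragraphs.pop()'
def pvATrimBack : List String → List String
  | [] => []
  | x :: xs =>
    match pvATrimBack xs with
    | [] => if x = "" then [] else [x]
    | r => x :: r

def squash_single_newlines (lines : List String) : String :=
  let st := (lines ++ [""]).foldl pvAStep ([], [])
  PySem.Str.join "\n\n" (pvATrimBack (pvATrimFront st.1))

-- ===== PORT B =====
-- B's outer while loop: one step per maximal run of blank / content lines
def pvBRuns : Bool → List String → List String
  | _, [] => []
  | prev, l :: ls =>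
    if PySem.Str.strip l = "" then
      let blanks := ls.takeWhile (fun x => PySem.Str.strip x = "")
      List.replicate (if prev then blanks.length else blanks.length + 1) "" ++
        pvBRuns false (ls.dropWhile (fun x => PySem.Str.strip x = ""))
    else
      let run := l :: ls.takeWhile (fun x => ¬ PySem.Str.strip x = "")
      PySem.Str.strip (PySem.Str.join " " (run.map PySem.Str.strip)) ::
        pvBRuns true (ls.dropWhile (fun x => ¬ PySem.Str.strip x = ""))
termination_by _ xs => xs.length
decreasing_by
  · exact Nat.lt_succ_of_le (List.length_dropWhile_le _ _)
  · exact Nat.lt_succ_of_le (List.length_dropWhile_le _ _)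

def squash_single_newlines_alt (lines : List String) : String :=
  let paras := pvBRuns false lines
  -- the lo/hi trimming: drop leading empty paragraphs, then trailing ones
  PySem.Str.join "\n\n" (((paras.dropWhile (· = "")).reverse.dropWhile (· = "")).reverse)

-- ===== PRECONDITION & SPEC =====
def Spec_squash_single_newlines (lines : List String) (out : String) : Prop := out = squash_single_newlines_alt lines
instance (lines : List String) (out : String) : Decidable (Spec_squash_single_newlines lines out) := by unfold Spec_squash_single_newlines; infer_instance

-- ===== CLAIM (what is proved, stated in full; the proofs are below) =====
def Claim_equal_squash_single_newlines : Prop := ∀ (lines : List String), Dom_squash_single_newlines lines → Spec_squash_single_newlines lines (squash_single_newlines lines)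

-- ===== LEMMAS AND PROOFS =====

-- recursive characterisation of A's fold: paragraphs emitted from pending buffer buf on the remaining lines
def pvHA (buf : List String) : List String → List String
  | [] => []
  | l :: ls =>
    if PySem.Str.strip l = "" then
      if buf ≠ [] then PySem.Str.strip (PySem.Str.join " " buf) :: pvHA [] ls
      else "" :: pvHA buf ls
    else pvHA (buf ++ [PySem.Str.strip l]) ls

theorem pvHA_foldl (xs : List String) : ∀ (ps buf : List String),
    ((xs.foldl pvAStep (ps, buf)).1 = ps ++ pvHA buf xs) := by
  induction xs with
  | nil => intro ps buf; simp [pvHA]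
  | cons l ls ih =>
    intro ps buf
    simp only [List.foldl_cons, pvAStep, pvHA]
    by_cases h : PySem.Str.strip l = "" <;> simp [h]
    · by_cases hb : buf = [] <;> simp [hb, ih]
    · simp [ih]

-- a run of blank lines with empty buffer emits one "" per line
theorem pvHA_blanks (bs : List String) (hb : ∀ x ∈ bs, PySem.Str.strip x = "") (ys : List String) :
    pvHA [] (bs ++ ys) = List.replicate bs.length "" ++ pvHA [] ys := by
  induction bs with
  | nil => simp
  | cons b bs ih =>
    simp only [List.cons_append, pvHA, hb b (by simp)]
    simp [ih (fun x hx => hb x (by simp [hx])), List.replicate_succ]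

-- a run of content lines is accumulated into the buffer
theorem pvHA_content (run : List String) (hr : ∀ x ∈ run, ¬ PySem.Str.strip x = "") :
    ∀ (buf ys : List String), pvHA buf (run ++ ys) = pvHA (buf ++ run.map PySem.Str.strip) ys := by
  induction run with
  | nil => simp
  | cons r rs ih =>
    intro buf ys
    have h1 : ¬ PySem.Str.strip r = "" := hr r (by simp)
    simp only [List.cons_append, pvHA, List.map_cons]
    rw [if_neg h1, ih (fun x hx => hr x (by simp [hx])) (buf ++ [PySem.Str.strip r]) ys,
      List.append_assoc]
    rfl

-- the padding A's sentinel blank adds when the input does not end in a content line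
def pvPad (xs : List String) : List String :=
  match xs.getLast? with
  | none => [""]
  | some l => if PySem.Str.strip l = "" then [""] else []

theorem pvPad_append (pre rest : List String) (h : rest ≠ []) :
    pvPad (pre ++ rest) = pvPad rest := by
  unfold pvPad
  rw [List.getLast?_append]
  match hr : rest.getLast? with
  | none => exact absurd (List.getLast?_eq_none_iff.mp hr) h
  | some y => simp [Option.or]

theorem pvPad_blank (ys : List String) (h : ys ≠ []) (hb : ∀ x ∈ ys, PySem.Str.strip x = "") :
    pvPad ys = [""] := by
  unfold pvPad
  match hy : ys.getLast? with
  | none => exact absurd (List.getLast?_eq_none_iff.mp hy) h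
  | some y =>
    have : y ∈ ys := List.mem_of_getLast? hy
    simp [hb y this]

theorem pvPad_cases (xs : List String) : pvPad xs = [] ∨ pvPad xs = [""] := by
  unfold pvPad
  match xs.getLast? with
  | none => right; rfl
  | some l => by_cases h : PySem.Str.strip l = "" <;> simp [h]

theorem pvDropWhile_head (l : List String) (p : String → Bool) (a : String) (rest : List String)
    (h : l.dropWhile p = a :: rest) : p a = false := by
  have := List.head?_dropWhile_not p l
  simp [h] at this; exact this

-- MAIN: A's emitted paragraph list is B's, plus the sentinel padding
theorem pvMain : ∀ (n : Nat) (xs : List String), xs.length ≤ n →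
    pvHA [] (xs ++ [""]) = pvBRuns false xs ++ pvPad xs := by
  intro n
  induction n with
  | zero =>
    intro xs hx
    have : xs = [] := List.eq_nil_of_length_eq_zero (Nat.le_zero.mp hx)
    subst this
    simp [pvHA, pvBRuns, pvPad, show PySem.Str.strip "" = "" from rfl]
  | succ n ih =>
    intro xs hx
    match xs with
    | [] => simp [pvHA, pvBRuns, pvPad, show PySem.Str.strip "" = "" from rfl]
    | l :: ls =>
      by_cases hl : PySem.Str.strip l = ""
      · -- blank run
        set p : String → Bool := fun x => decide (PySem.Str.strip x = "") with hp
        have hsplit : ls.takeWhile p ++ ls.dropWhile p = ls := List.takeWhile_append_dropWhile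
        have hblanks : ∀ x ∈ ls.takeWhile p, PySem.Str.strip x = "" := by
          intro x hx'
          simpa [hp] using List.mem_takeWhile_imp hx'
        have hlen : (ls.dropWhile p).length ≤ n := by
          have h1 : (ls.dropWhile p).length ≤ ls.length := List.length_dropWhile_le p ls
          have h2 : ls.length + 1 ≤ n + 1 := by simpa using hx
          omega
        have lhs : pvHA [] ((l :: ls) ++ [""]) =
            "" :: (List.replicate (ls.takeWhile p).length "" ++
              (pvBRuns false (ls.dropWhile p) ++ pvPad (ls.dropWhile p))) := by
          simp only [List.cons_append, pvHA, hl, if_pos, ne_eq, not_true_eq_false]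
          rw [show ls ++ [""] = ls.takeWhile p ++ (ls.dropWhile p ++ [""]) by
                rw [← List.append_assoc, hsplit]]
          rw [pvHA_blanks _ hblanks, ih _ hlen]
          simp
        have rhs : pvBRuns false (l :: ls) =
            List.replicate ((ls.takeWhile p).length + 1) "" ++ pvBRuns false (ls.dropWhile p) := by
          rw [pvBRuns]
          simp [hl, hp]
        rw [lhs, rhs]
        by_cases hrest : ls.dropWhile p = []
        · have hpadr : pvPad (ls.dropWhile p) = [""] := by simp [hrest, pvPad]
          have hpadx : pvPad (l :: ls) = [""] := by
            apply pvPad_blank _ (by simp)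
            intro x hx'
            rcases List.mem_cons.mp hx' with h | h
            · subst h; exact hl
            · rw [← hsplit] at h
              rcases List.mem_append.mp h with h | h
              · exact hblanks x h
              · rw [hrest] at h; simp at h
          rw [hpadr, hpadx]
          simp [List.replicate_succ]
        · have hpadx : pvPad (l :: ls) = pvPad (ls.dropWhile p) := by
            have : l :: ls = (l :: ls.takeWhile p) ++ ls.dropWhile p := by
              simp [hsplit]
            rw [this, pvPad_append _ _ hrest]
          rw [hpadx]
          simp [List.replicate_succ]
      · -- content run
        set q : String → Bool := fun x => decide (¬ PySem.Str.strip x = "") with hq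
        have hsplit : ls.takeWhile q ++ ls.dropWhile q = ls := List.takeWhile_append_dropWhile
        have hrun : ∀ x ∈ l :: ls.takeWhile q, ¬ PySem.Str.strip x = "" := by
          intro x hx'
          rcases List.mem_cons.mp hx' with h | h
          · subst h; exact hl
          · simpa [hq] using List.mem_takeWhile_imp h
        have lhs0 : pvHA [] ((l :: ls) ++ [""]) =
            pvHA ((l :: ls.takeWhile q).map PySem.Str.strip) (ls.dropWhile q ++ [""]) := by
          have : (l :: ls) ++ [""] = (l :: ls.takeWhile q) ++ (ls.dropWhile q ++ [""]) := by
            simp only [List.cons_append, ← List.append_assoc, hsplit]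
          rw [this, pvHA_content _ hrun]
          simp
        have rhs0 : pvBRuns false (l :: ls) =
            PySem.Str.strip (PySem.Str.join " " ((l :: ls.takeWhile q).map PySem.Str.strip)) ::
              pvBRuns true (ls.dropWhile q) := by
          rw [pvBRuns]
          simp [hl, hq]
        rw [lhs0, rhs0]
        match hrest : ls.dropWhile q with
        | [] =>
          have hpadx : pvPad (l :: ls) = [] := by
            unfold pvPad
            have hlast : (l :: ls).getLast? = some ((l :: ls.takeWhile q).getLast (by simp)) := by
              have : l :: ls = l :: ls.takeWhile q := by
                conv_lhs => rw [show ls = ls.takeWhile q ++ ls.dropWhile q from hsplit.symm]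
                simp [hrest]
              rw [this, List.getLast?_eq_some_getLast]
            rw [hlast]
            have : ¬ PySem.Str.strip ((l :: ls.takeWhile q).getLast (by simp)) = "" :=
              hrun _ (List.getLast_mem _)
            simp [this]
          rw [hpadx]
          simp [pvHA, pvBRuns, show PySem.Str.strip "" = "" from rfl]
        | b :: rest' =>
          have hb : PySem.Str.strip b = "" := by
            have := pvDropWhile_head ls q b rest' hrest
            simpa [hq] using this
          -- A: the first blank flushes the buffer
          have lhs1 : pvHA ((l :: ls.takeWhile q).map PySem.Str.strip) ((b :: rest') ++ [""]) =
              PySem.Str.strip (PySem.Str.join " " ((l :: ls.takeWhile q).map PySem.Str.strip)) ::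
                pvHA [] (rest' ++ [""]) := by
            simp only [List.cons_append, pvHA, hb, if_pos]
            simp
          rw [lhs1]
          -- B: continues with prev = true on the blank run
          set p : String → Bool := fun x => decide (PySem.Str.strip x = "") with hp
          have hsplit' : rest'.takeWhile p ++ rest'.dropWhile p = rest' := List.takeWhile_append_dropWhile
          have hblanks' : ∀ x ∈ rest'.takeWhile p, PySem.Str.strip x = "" := by
            intro x hx'
            simpa [hp] using List.mem_takeWhile_imp hx'
          have hlen2 : (rest'.dropWhile p).length ≤ n := by
            have h1 : (ls.dropWhile q).length ≤ ls.length := List.length_dropWhile_le q ls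
            rw [hrest] at h1
            have h2 : (rest'.dropWhile p).length ≤ rest'.length := List.length_dropWhile_le p rest'
            simp at h1 hx
            omega
          have lhs2 : pvHA [] (rest' ++ [""]) =
              List.replicate (rest'.takeWhile p).length "" ++
                (pvBRuns false (rest'.dropWhile p) ++ pvPad (rest'.dropWhile p)) := by
            rw [show rest' ++ [""] = rest'.takeWhile p ++ (rest'.dropWhile p ++ [""]) by
                  rw [← List.append_assoc, hsplit']]
            rw [pvHA_blanks _ hblanks', ih _ hlen2]
          have rhs2 : pvBRuns true (b :: rest') =
              List.replicate (rest'.takeWhile p).length "" ++ pvBRuns false (rest'.dropWhile p) := by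
            rw [pvBRuns]
            simp [hb, hp]
          rw [lhs2, rhs2]
          by_cases hrest2 : rest'.dropWhile p = []
          · have hpadr : pvPad (rest'.dropWhile p) = [""] := by simp [hrest2, pvPad]
            have hpadx : pvPad (l :: ls) = [""] := by
              have hxs : l :: ls = (l :: ls.takeWhile q) ++ (b :: rest') := by
                conv_lhs => rw [show ls = ls.takeWhile q ++ ls.dropWhile q from hsplit.symm, hrest]
                simp
              rw [hxs, pvPad_append _ _ (by simp)]
              apply pvPad_blank _ (by simp)
              intro x hx'
              rcases List.mem_cons.mp hx' with h | h
              · subst h; exact hb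
              · rw [← hsplit'] at h
                rcases List.mem_append.mp h with h | h
                · exact hblanks' x h
                · rw [hrest2] at h; simp at h
            rw [hpadr, hpadx]
            simp
          · have hpadx : pvPad (l :: ls) = pvPad (rest'.dropWhile p) := by
              have hxs : l :: ls = ((l :: ls.takeWhile q) ++ (b :: rest'.takeWhile p)) ++ rest'.dropWhile p := by
                conv_lhs => rw [show ls = ls.takeWhile q ++ ls.dropWhile q from hsplit.symm, hrest]
                conv_lhs => rw [show rest' = rest'.takeWhile p ++ rest'.dropWhile p from hsplit'.symm]
                simp
              rw [hxs, pvPad_append _ _ hrest2]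
            rw [hpadx]
            simp

theorem pvTrimBack_eq (L : List String) :
    pvATrimBack L = (L.reverse.dropWhile (· = "")).reverse := by
  induction L with
  | nil => simp [pvATrimBack]
  | cons x xs ih =>
    simp only [pvATrimBack, List.reverse_cons, List.dropWhile_append]
    by_cases h : (List.dropWhile (· = "") xs.reverse) = []
    · simp [h] at ih
      simp [h, ih, List.dropWhile]
      by_cases hx : x = "" <;> simp [hx]
    · have : ¬ (List.dropWhile (· = "") xs.reverse).isEmpty := by
        simpa [List.isEmpty_iff] using h
      simp only [ih]
      rw [if_neg this]
      simp only [List.reverse_append, List.reverse_cons]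
      match hm : (List.dropWhile (· = "") xs.reverse).reverse with
      | [] => exact absurd (by simpa using hm) h
      | r :: rs => simp

theorem pvTrimFront_eq (L : List String) : pvATrimFront L = L.dropWhile (· = "") := by
  induction L with
  | nil => rfl
  | cons x xs ih =>
    by_cases h : x = "" <;> simp [pvATrimFront, List.dropWhile, h, ih]

-- ===== VERDICT (by name: the statement is the Claim_ definition above) =====
theorem squash_single_newlines_spec : Claim_equal_squash_single_newlines := by
  intro lines _
  unfold Spec_squash_single_newlines squash_single_newlines squash_single_newlines_alt
  simp only [pvHA_foldl _ [] [], List.nil_append]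
  rw [pvMain lines.length lines (le_refl _), pvTrimFront_eq, pvTrimBack_eq]
  by_cases hE : (pvBRuns false lines).dropWhile (· = "") = []
  · -- everything is blank: both sides trim to the empty list
    have hP : List.dropWhile (· = "") (pvBRuns false lines ++ pvPad lines) = [] := by
      rw [List.dropWhile_append]
      rcases pvPad_cases lines with h | h <;>
        simp [hE, h, List.dropWhile]
    rw [hE, hP]
  · -- the padding sits after surviving content and is trimmed from the back
    have hP : List.dropWhile (· = "") (pvBRuns false lines ++ pvPad lines) =
        List.dropWhile (· = "") (pvBRuns false lines) ++ pvPad lines := by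
      rw [List.dropWhile_append, if_neg (by simpa [List.isEmpty_iff] using hE)]
    rw [hP]
    rcases pvPad_cases lines with h | h
    · simp [h]
    · rw [h]
      simp
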